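-- pv_equiv track=rewrite | github.com/yuseung0429/Algorithm | Programmers/Python/solved/Problem_120866.py | solution
-- ===== SOURCE A (Python) =====
-- def solution(board):
--     n = len(board)
--
--     arr = [[0 for j in range(n)] for i in range(n)]
--
--     for i in range(n):
--         for j in range(n):
--             if board[i][j] == 1:
--                 arr = mark(board, arr, i, j)
--
--     cnt = 0
--     for i in range(n):
--         for j in range(n):
--             if arr[i][j] == 0:
--                 cnt += 1
--     return cnt
--
-- def mark(board, result, idx_r, idx_c):
--     n = len(board)
--     for i in range(-1,2,1):
--         for j in range(-1,2,1):
--             if((idx_r+i >= 0) & (idx_r+i < n) & (idx_c+j >= 0) & (idx_c+j < n)) :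
--                 result[idx_r+i][idx_c+j] = 1
--     return result
-- ===== SOURCE B (Python) =====
-- def solution(board):
--     n = len(board)
--     danger = {(i, j) for i in range(n) for j in range(n) if board[i][j] == 1}
--     cnt = 0
--     for i in range(n):
--         for j in range(n):
--             if all((i + di, j + dj) not in danger
--                    for di in (-1, 0, 1) for dj in (-1, 0, 1)):
--                 cnt += 1
--     return cnt
-- ===== Notes on version B (the rewrite author's own statement) =====
-- stated objective: alternative
-- what changed: Replaces A's scatter approach (maintain an n×n marker grid, painting the 3×3 neighbourhood of every 1-cell, then count zeros) with a gather approach: build a set of danger coordinates once, then count cells for which none of the 9 offset coordinates is in the set — no marker grid exists.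
import Mathlib
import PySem

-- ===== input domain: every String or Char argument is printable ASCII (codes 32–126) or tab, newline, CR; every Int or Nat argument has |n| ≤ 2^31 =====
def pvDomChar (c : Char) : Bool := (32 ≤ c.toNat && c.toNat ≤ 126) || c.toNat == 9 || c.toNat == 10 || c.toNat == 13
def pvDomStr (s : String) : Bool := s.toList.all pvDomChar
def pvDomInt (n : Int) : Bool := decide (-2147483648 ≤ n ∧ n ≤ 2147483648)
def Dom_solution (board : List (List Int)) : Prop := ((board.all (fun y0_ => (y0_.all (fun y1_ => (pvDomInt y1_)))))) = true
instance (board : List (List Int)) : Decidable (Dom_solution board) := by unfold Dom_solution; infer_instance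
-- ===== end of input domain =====

-- B replaces A's scatter (paint a 3×3 neighbourhood of each 1-cell into a marker grid, then count
-- zeros) with a gather (build a set of danger coordinates, count cells with no offset in the set).

-- ===== PORT A =====

-- board[i][j] read; Pre_solution guarantees the indices are in range, so the default is never used
def pvCell (g : List (List Int)) (i j : Int) : Int :=
  PySem.List.pyGetD (PySem.List.pyGetD g i []) j 0

-- result[r][c] = v (Nat indices; mark's guard has already checked 0 ≤ and < n, so toNat is exact)
def set2 (g : List (List Int)) (r c : Nat) (v : Int) : List (List Int) :=
  g.set r ((g.getD r []).set c v)

def mark (board result : List (List Int)) (idx_r idx_c : Int) : List (List Int) :=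
  (PySem.List.pyRange (-1) 2 1).foldl (fun res i =>
    (PySem.List.pyRange (-1) 2 1).foldl (fun res j =>
      if 0 ≤ idx_r + i ∧ idx_r + i < (board.length : Int) ∧
         0 ≤ idx_c + j ∧ idx_c + j < (board.length : Int) then
        set2 res (idx_r + i).toNat (idx_c + j).toNat 1
      else res) res) result

def solution (board : List (List Int)) : Int :=
  let n : Int := board.length
  let arr0 := (PySem.List.pyRange 0 n 1).map (fun _ => (PySem.List.pyRange 0 n 1).map (fun _ => (0 : Int)))
  let arr := (PySem.List.pyRange 0 n 1).foldl (fun a i =>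
      (PySem.List.pyRange 0 n 1).foldl (fun a j =>
        if pvCell board i j == 1 then mark board a i j else a) a) arr0
  (PySem.List.pyRange 0 n 1).foldl (fun cnt i =>
      (PySem.List.pyRange 0 n 1).foldl (fun cnt j =>
        if pvCell arr i j == 0 then cnt + 1 else cnt) cnt) 0

-- ===== PORT B =====
def solution_alt (board : List (List Int)) : Int :=
  let n : Int := board.length
  let danger : PySem.Set (Int × Int) := PySem.Set.ofList
    ((PySem.List.pyRange 0 n 1).flatMap (fun i =>
      (PySem.List.pyRange 0 n 1).filterMap (fun j =>
        if pvCell board i j == 1 then some (i, j) else none)))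
  (PySem.List.pyRange 0 n 1).foldl (fun cnt i =>
      (PySem.List.pyRange 0 n 1).foldl (fun cnt j =>
        if ([-1, 0, 1] : List Int).all (fun di => ([-1, 0, 1] : List Int).all (fun dj =>
             !danger.contains (i + di, j + dj))) then cnt + 1 else cnt) cnt) 0

-- ===== PRECONDITION & SPEC =====
-- Pre_ excludes boards with a row shorter than the number of rows, on which A's board[i][j] raises IndexError.
def Pre_solution (board : List (List Int)) : Prop :=
  ∀ row ∈ board, board.length ≤ row.length
instance (board : List (List Int)) : Decidable (Pre_solution board) := by unfold Pre_solution; infer_instance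

def pvWitness_solution : List (List Int) := [[1, 0], [0, 0]]

def Spec_solution (board : List (List Int)) (out : Int) : Prop := out = solution_alt board
instance (board : List (List Int)) (out : Int) : Decidable (Spec_solution board out) := by unfold Spec_solution; infer_instance

-- ===== CLAIM (what is proved, stated in full; the proofs are below) =====
def Claim_equal_solution : Prop := ∀ (board : List (List Int)), Dom_solution board → Pre_solution board → Spec_solution board (solution board)

-- ===== LEMMAS AND PROOFS =====

-- read at Nat indices (what both counting loops see after pyGetD_of_nonneg)
def readN (g : List (List Int)) (i j : Nat) : Int := (g.getD i []).getD j 0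

-- shape of a grid: n rows, each of length n
def Shape (n : Nat) (g : List (List Int)) : Prop :=
  g.length = n ∧ ∀ row ∈ g, row.length = n

theorem pvCell_eq_readN (g : List (List Int)) (i j : Int) (hi : 0 ≤ i) (hj : 0 ≤ j) :
    pvCell g i j = readN g i.toNat j.toNat := by
  simp [pvCell, readN, PySem.List.pyGetD_of_nonneg _ _ hi, PySem.List.pyGetD_of_nonneg _ _ hj]

theorem shape_set2 (n : Nat) (g : List (List Int)) (h : Shape n g) (r c : Nat)
    (hr : r < n) (v : Int) : Shape n (set2 g r c v) := by
  obtain ⟨h1, h2⟩ := h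
  have hrg : r < g.length := by omega
  have hrow : (g.getD r []).length = n := h2 _ (by
    rw [List.getD_eq_getElem?_getD, List.getElem?_eq_getElem hrg]; exact List.getElem_mem hrg)
  refine ⟨by simp [set2, h1], ?_⟩
  intro row hrow'
  rcases List.mem_or_eq_of_mem_set hrow' with hm | hm
  · exact h2 _ hm
  · subst hm; simpa using hrow

theorem readN_set2 (n : Nat) (g : List (List Int)) (h : Shape n g) (r c : Nat)
    (hr : r < n) (hc : c < n) (i j : Nat) (hi : i < n) (hj : j < n) (v : Int) :
    readN (set2 g r c v) i j = if i = r ∧ j = c then v else readN g i j := by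
  obtain ⟨h1, h2⟩ := h
  have hrg : r < g.length := by omega
  have hig : i < g.length := by omega
  have hrow : (g.getD r []).length = n := h2 _ (by
    rw [List.getD_eq_getElem?_getD, List.getElem?_eq_getElem hrg]; exact List.getElem_mem hrg)
  by_cases hir : i = r
  · subst hir
    simp only [readN, set2, List.getD_eq_getElem?_getD, List.getElem?_set_self hig]
    have hjlt : j < ((g[i]?).getD []).length := by
      rw [← List.getD_eq_getElem?_getD]; omega
    by_cases hjc : j = c
    · subst hjc
      simp [List.getElem?_set_self hjlt]
    · simp [hjc, List.getElem?_set_ne (by omega : c ≠ j)]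
  · simp [readN, set2, hir, List.getD_eq_getElem?_getD, List.getElem?_set_ne (by omega : r ≠ i)]

-- the 9 offsets of mark, as one flat list
def offs : List (Int × Int) :=
  ([-1, 0, 1] : List Int).flatMap (fun di => ([-1, 0, 1] : List Int).map (fun dj => (di, dj)))

theorem mark_eq_foldl_offs (board res : List (List Int)) (r c : Int) :
    mark board res r c = offs.foldl (fun a p =>
      if 0 ≤ r + p.1 ∧ r + p.1 < (board.length : Int) ∧
         0 ≤ c + p.2 ∧ c + p.2 < (board.length : Int) then
        set2 a (r + p.1).toNat (c + p.2).toNat 1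
      else a) res := by
  rw [offs, List.foldl_flatMap]
  have h9 : PySem.List.pyRange (-1) 2 1 = ([-1, 0, 1] : List Int) := by decide
  simp [mark, h9]

theorem shape_mark (n : Nat) (board : List (List Int)) (hn : board.length = n)
    (g : List (List Int)) (h : Shape n g) (r c : Int) :
    Shape n (mark board g r c) := by
  rw [mark_eq_foldl_offs]
  induction offs generalizing g with
  | nil => exact h
  | cons p t ih =>
    simp only [List.foldl_cons]
    apply ih
    split
    · next hcond => exact shape_set2 n g h _ _ (by omega) _
    · exact h

theorem mem_offs (a b : Int) : (a, b) ∈ offs ↔ -1 ≤ a ∧ a ≤ 1 ∧ -1 ≤ b ∧ b ≤ 1 := by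
  simp [offs, Prod.ext_iff]
  omega

theorem readN_foldOffs (n : Nat) (board : List (List Int)) (hn : board.length = n)
    (r c : Int) (i j : Nat) (hi : i < n) (hj : j < n) (O : List (Int × Int))
    (g : List (List Int)) (h : Shape n g) :
    readN (O.foldl (fun a p =>
      if 0 ≤ r + p.1 ∧ r + p.1 < (board.length : Int) ∧
         0 ≤ c + p.2 ∧ c + p.2 < (board.length : Int) then
        set2 a (r + p.1).toNat (c + p.2).toNat 1
      else a) g) i j =
      if ∃ p ∈ O, r + p.1 = (i : Int) ∧ c + p.2 = (j : Int) then 1 else readN g i j := by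
  induction O generalizing g with
  | nil => simp
  | cons p t ih =>
    simp only [List.foldl_cons]
    by_cases hb : 0 ≤ r + p.1 ∧ r + p.1 < (board.length : Int) ∧
        0 ≤ c + p.2 ∧ c + p.2 < (board.length : Int)
    · rw [if_pos hb, ih _ (shape_set2 n g h _ _ (by omega) _)]
      rw [readN_set2 n g h _ _ (by omega) (by omega) i j hi hj]
      by_cases ht : ∃ q ∈ t, r + q.1 = (i : Int) ∧ c + q.2 = (j : Int)
      · rw [if_pos ht, if_pos]
        obtain ⟨q, hq, hq2⟩ := ht
        exact ⟨q, List.mem_cons_of_mem _ hq, hq2⟩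
      · rw [if_neg ht]
        by_cases hh : (i : Int) = r + p.1 ∧ (j : Int) = c + p.2
        · rw [if_pos (by omega), if_pos ⟨p, List.mem_cons_self, by omega⟩]
        · rw [if_neg (by omega), if_neg]
          rintro ⟨q, hq, hq2⟩
          rcases List.mem_cons.mp hq with hq | hq
          · subst hq; omega
          · exact ht ⟨q, hq, hq2⟩
    · rw [if_neg hb, ih _ h]
      congr 1
      simp only [eq_iff_iff]
      constructor
      · rintro ⟨q, hq, hq2⟩
        exact ⟨q, List.mem_cons_of_mem _ hq, hq2⟩
      · rintro ⟨q, hq, hq2⟩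
        rcases List.mem_cons.mp hq with h' | h'
        · subst h'; exact (hb (by omega)).elim
        · exact ⟨q, h', hq2⟩

theorem readN_mark (n : Nat) (board : List (List Int)) (hn : board.length = n)
    (g : List (List Int)) (h : Shape n g) (r c : Int)
    (i j : Nat) (hi : i < n) (hj : j < n) :
    readN (mark board g r c) i j =
      if |(i : Int) - r| ≤ 1 ∧ |(j : Int) - c| ≤ 1 then 1 else readN g i j := by
  rw [mark_eq_foldl_offs, readN_foldOffs n board hn r c i j hi hj offs g h]
  congr 1
  simp only [eq_iff_iff, abs_le]
  constructor
  · rintro ⟨q, hq, h1, h2⟩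
    rw [← Prod.mk.eta (p := q), mem_offs] at hq
    omega
  · rintro ⟨h1, h2⟩
    exact ⟨((i : Int) - r, (j : Int) - c), (mem_offs _ _).mpr (by omega), by omega, by omega⟩

-- fold of mark over a list of in-range coordinates
theorem readN_foldMark (n : Nat) (board : List (List Int)) (hn : board.length = n)
    (L : List (Int × Int)) (g : List (List Int)) (h : Shape n g)
    (i j : Nat) (hi : i < n) (hj : j < n) :
    readN (L.foldl (fun a p => mark board a p.1 p.2) g) i j =
      if ∃ p ∈ L, |(i : Int) - p.1| ≤ 1 ∧ |(j : Int) - p.2| ≤ 1 then 1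
      else readN g i j := by
  induction L generalizing g with
  | nil => simp
  | cons p t ih =>
    simp only [List.foldl_cons]
    rw [ih _ (shape_mark n board hn g h p.1 p.2)]
    rw [readN_mark n board hn g h p.1 p.2 i j hi hj]
    by_cases ht : ∃ q ∈ t, |(i : Int) - q.1| ≤ 1 ∧ |(j : Int) - q.2| ≤ 1
    · rw [if_pos ht, if_pos]
      obtain ⟨q, hq, hq2⟩ := ht
      exact ⟨q, List.mem_cons_of_mem _ hq, hq2⟩
    · rw [if_neg ht]
      by_cases hh : |(i : Int) - p.1| ≤ 1 ∧ |(j : Int) - p.2| ≤ 1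
      · rw [if_pos hh, if_pos ⟨p, List.mem_cons_self, hh⟩]
      · rw [if_neg hh, if_neg]
        rintro ⟨q, hq, hq2⟩
        rcases List.mem_cons.mp hq with hq | hq
        · subst hq; exact hh hq2
        · exact ht ⟨q, hq, hq2⟩

-- the danger-coordinate list B builds (also = A's 1-cells in scan order)
def cellsDL (board : List (List Int)) : List (Int × Int) :=
  (PySem.List.pyRange 0 (board.length : Int) 1).flatMap (fun i =>
    (PySem.List.pyRange 0 (board.length : Int) 1).filterMap (fun j =>
      if pvCell board i j == 1 then some (i, j) else none))

theorem filterMap_if_eq_map_filter (R : List Int) (c : Int → Bool) (i : Int) :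
    R.filterMap (fun j => if c j then some (i, j) else none) =
      (R.filter c).map (fun j => (i, j)) := by
  induction R with
  | nil => rfl
  | cons a t ih => by_cases h : c a <;> simp [h, ih]

-- A's marking phase is the fold of mark over exactly that list
theorem markPhase_eq (board arr0 : List (List Int)) :
    (PySem.List.pyRange 0 (board.length : Int) 1).foldl (fun a i =>
      (PySem.List.pyRange 0 (board.length : Int) 1).foldl (fun a j =>
        if pvCell board i j == 1 then mark board a i j else a) a) arr0 =
    (cellsDL board).foldl (fun a p => mark board a p.1 p.2) arr0 := by
  simp only [cellsDL, filterMap_if_eq_map_filter, List.foldl_flatMap, List.foldl_map]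
  apply PySem.List.foldl_congr_mem
  intro acc i _
  rw [PySem.List.foldl_if_eq_foldl_filter (fun j => pvCell board i j == 1)
    (fun a j => mark board a i j)]

def arr0Of (board : List (List Int)) : List (List Int) :=
  (PySem.List.pyRange 0 (board.length : Int) 1).map (fun _ =>
    (PySem.List.pyRange 0 (board.length : Int) 1).map (fun _ => (0 : Int)))

theorem shape_arr0 (board : List (List Int)) : Shape board.length (arr0Of board) := by
  constructor
  · simp [arr0Of, PySem.List.length_pyRange_one]
  · intro row hrow
    simp only [arr0Of, List.mem_map] at hrow
    obtain ⟨_, _, hrow⟩ := hrow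
    simp [← hrow, PySem.List.length_pyRange_one]

theorem readN_arr0 (board : List (List Int)) (i j : Nat)
    (hi : i < board.length) (hj : j < board.length) : readN (arr0Of board) i j = 0 := by
  have h1 : i < (arr0Of board).length := by
    simpa [arr0Of, PySem.List.length_pyRange_one] using hi
  have h2 := (shape_arr0 board).2
  simp only [readN, List.getD_eq_getElem?_getD]
  rw [List.getElem?_eq_getElem h1]
  simp only [arr0Of, List.getElem_map, Option.getD_some, List.getElem?_map]
  rw [PySem.List.getElem?_pyRange_one]
  simp [hj]

-- the per-cell agreement of the two loop conditions
theorem cond_pointwise (board : List (List Int)) (i j : Int)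
    (hi1 : 0 ≤ i) (hi2 : i < (board.length : Int)) (hj1 : 0 ≤ j) (hj2 : j < (board.length : Int)) :
    (pvCell ((cellsDL board).foldl (fun a p => mark board a p.1 p.2) (arr0Of board)) i j == 0) =
    (([-1, 0, 1] : List Int).all fun di => ([-1, 0, 1] : List Int).all fun dj =>
      !(PySem.Set.ofList (cellsDL board)).contains (i + di, j + dj)) := by
  have hiN : (i.toNat : Int) = i := Int.toNat_of_nonneg hi1
  have hjN : (j.toNat : Int) = j := Int.toNat_of_nonneg hj1
  have hread := readN_foldMark board.length board rfl (cellsDL board) (arr0Of board)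
    (shape_arr0 board) i.toNat j.toNat (by omega) (by omega)
  rw [readN_arr0 board _ _ (by omega) (by omega)] at hread
  rw [pvCell_eq_readN _ _ _ hi1 hj1, hread]
  rw [Bool.eq_iff_iff]
  simp only [List.all_eq_true, List.mem_cons, List.not_mem_nil, or_false,
    Bool.not_eq_true', PySem.Set.contains, List.contains_eq_mem,
    decide_eq_false_iff_not, PySem.Set.mem_ofList, hiN, hjN]
  by_cases hnear : ∃ p ∈ cellsDL board, |i - p.1| ≤ 1 ∧ |j - p.2| ≤ 1
  · rw [if_pos hnear]
    simp only [show ((1 : Int) == 0) = false by decide, Bool.false_eq_true, false_iff]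
    obtain ⟨p, hp, hp1, hp2⟩ := hnear
    rw [abs_le] at hp1 hp2
    intro hall
    exact hall (p.1 - i) (by omega) (p.2 - j) (by omega)
      (by simpa [add_sub_cancel] using hp)
  · rw [if_neg hnear]
    simp only [show ((0 : Int) == 0) = true by decide, true_iff]
    intro di hdi dj hdj hmem
    exact hnear ⟨(i + di, j + dj), hmem, by rw [abs_le]; constructor <;> omega,
      by rw [abs_le]; constructor <;> omega⟩

-- ===== VERDICT (by name: the statement is the Claim_ definition above) =====
theorem solution_spec : Claim_equal_solution := by
  intro board _ _
  show solution board = solution_alt board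
  simp only [solution, solution_alt]
  rw [show List.map (fun _ : Int => List.map (fun _ : Int => (0 : Int))
      (PySem.List.pyRange 0 (board.length : Int) 1)) (PySem.List.pyRange 0 (board.length : Int) 1)
      = arr0Of board from rfl]
  rw [markPhase_eq board]
  apply PySem.List.foldl_congr_mem
  intro acc i hi
  apply PySem.List.foldl_congr_mem
  intro acc' j hj
  rw [PySem.List.mem_pyRange_one] at hi hj
  rw [cond_pointwise board i j hi.1 hi.2 hj.1 hj.2]
  rfl
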